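-- pv_equiv track=rewrite | github.com/steven2025888-cloud/zhimengai | ui/pages/page_script_rewrite.py | _trim_overlap
-- ===== SOURCE A (Python) =====
-- def _trim_overlap(prev: str, new: str, max_check: int = 300) -> str:
--     """
--     续写时常出现“重复一小段”，做一个很轻量的 overlap 去重。
--     """
--     if not prev or not new:
--         return new
--     a = prev[-max_check:]
--     b = new[:max_check]
--     best = 0
--     # 找最长公共后缀/前缀
--     for k in range(1, min(len(a), len(b)) + 1):
--         if a[-k:] == b[:k]:
--             best = k
--     return new[best:]
-- ===== SOURCE B (Python) =====
-- def _trim_overlap(prev: str, new: str, max_check: int = 300) -> str: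
--     """
--     Staged rolling-hash version: precompute the hash of every suffix of a and
--     every prefix of b in two linear passes, then scan lengths from the longest
--     down and return at the first hash hit confirmed by an exact comparison.
--     """
--     if not prev or not new:
--         return new
--     a = prev[-max_check:]
--     b = new[:max_check]
--     n = min(len(a), len(b))
--     MOD = 2305843009213693951  # 2**61 - 1
--     BASE = 1114112
--     # pass 1: suf[k-1] = hash of a[-k:], built scanning a's last n chars right-to-left
--     suf = []
--     h = 0
--     for ch in reversed(a[len(a) - n:]):
--         h = (ord(ch) + BASE * h) % MOD
--         suf.append(h)
--     # pass 2: pre[k-1] = hash of b[:k]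
--     pre = []
--     h = 0
--     pw = 1
--     for ch in b[:n]:
--         h = (h + ord(ch) * pw) % MOD
--         pre.append(h)
--         pw = (pw * BASE) % MOD
--     # pass 3: longest k first; exact check only on a hash hit
--     best = 0
--     for k in range(n, 0, -1):
--         if suf[k - 1] == pre[k - 1] and a[len(a) - k:] == b[:k]:
--             best = k
--             break
--     return new[best:]
-- ===== Notes on version B (the rewrite author's own statement) =====
-- stated objective: faster
-- what changed: Instead of slicing and comparing a[-k:] with b[:k] at every k (O(k) work per step), B runs three staged linear passes: it precomputes rolling hashes (base 1114112 mod 2^61-1) of all suffixes of a and all prefixes of b, then scans lengths from the longest down and stops at the first hash hit confirmed by one exact comparison.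
import Mathlib
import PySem

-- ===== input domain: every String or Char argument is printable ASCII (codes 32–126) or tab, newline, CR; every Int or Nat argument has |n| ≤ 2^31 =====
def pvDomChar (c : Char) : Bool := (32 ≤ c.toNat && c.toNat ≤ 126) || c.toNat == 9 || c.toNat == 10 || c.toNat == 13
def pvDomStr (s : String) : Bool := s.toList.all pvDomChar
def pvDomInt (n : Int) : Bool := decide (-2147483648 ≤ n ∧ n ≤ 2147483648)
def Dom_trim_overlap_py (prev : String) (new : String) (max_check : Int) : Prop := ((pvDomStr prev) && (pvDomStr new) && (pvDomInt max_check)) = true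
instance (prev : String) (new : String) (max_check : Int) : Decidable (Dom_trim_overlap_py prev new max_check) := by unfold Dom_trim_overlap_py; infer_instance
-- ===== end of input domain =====

-- B replaces A's per-length slice-and-compare loop by three staged linear passes:
-- it precomputes rolling hashes (base 1114112 mod 2^61-1) of every suffix of a and every
-- prefix of b, then scans lengths from the longest down, confirming a hash hit with one
-- exact comparison and stopping there (objective: faster).

-- ===== PORT A =====
-- body of A's loop: 'if a[-k:] == b[:k]: best = k'
def trimStepA (a b : List Char) (best : Int) (k : Int) : Int :=
  if PySem.List.slice a (some (-k)) none = PySem.List.slice b none (some k) then k else best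

def trim_overlap_py (prev : String) (new : String) (max_check : Int) : String :=
  if prev.toList = [] ∨ new.toList = [] then new
  else
    let a := PySem.List.slice prev.toList (some (-max_check)) none
    let b := PySem.List.slice new.toList none (some max_check)
    let best := (PySem.List.pyRange 1 (((min a.length b.length : Nat) : Int) + 1) 1).foldl (trimStepA a b) 0
    String.ofList (PySem.List.slice new.toList (some best) none)

-- ===== PORT B =====
-- pass 1 body: 'h = (ord(ch) + BASE*h) % MOD; suf.append(h)'  (state: h, suf)
def trimPass1Step (st : Int × List Int) (ch : Char) : Int × List Int :=
  let h := PySem.Int.mod ((ch.toNat : Int) + 1114112 * st.1) 2305843009213693951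
  (h, st.2 ++ [h])

-- pass 2 body: 'h = (h + ord(ch)*pw) % MOD; pre.append(h); pw = (pw*BASE) % MOD'  (state: h, pre, pw)
def trimPass2Step (st : Int × List Int × Int) (ch : Char) : Int × List Int × Int :=
  let h := PySem.Int.mod (st.1 + (ch.toNat : Int) * st.2.2) 2305843009213693951
  (h, st.2.1 ++ [h], PySem.Int.mod (st.2.2 * 1114112) 2305843009213693951)

-- pass 3: 'for k in range(n, 0, -1): if suf[k-1]==pre[k-1] and a[len(a)-k:]==b[:k]: best=k; break'.
-- Ported as recursion on k counting down; list indexing and the slices are in range on every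
-- iteration (1 ≤ k ≤ n = min(len a, len b)), so List.getD / drop / take are exact here.
def trimPass3 (a b : List Char) (suf pre : List Int) : Nat → Int
  | 0 => 0
  | Nat.succ m =>
    if suf.getD m 0 = pre.getD m 0 ∧ a.drop (a.length - (m + 1)) = b.take (m + 1)
    then ((m + 1 : Nat) : Int) else trimPass3 a b suf pre m

def trim_overlap_py_alt (prev : String) (new : String) (max_check : Int) : String :=
  if prev.toList = [] ∨ new.toList = [] then new
  else
    let a := PySem.List.slice prev.toList (some (-max_check)) none
    let b := PySem.List.slice new.toList none (some max_check)
    let n := min a.length b.length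
    -- 'a[len(a)-n:]' has a nonnegative start index, so it is the plain slice below
    let suf := (((PySem.List.slice a (some ((a.length : Int) - (n : Int))) none).reverse).foldl trimPass1Step (0, [])).2
    let pre := ((PySem.List.slice b none (some (n : Int))).foldl trimPass2Step (0, (([] : List Int), 1))).2.1
    String.ofList (PySem.List.slice new.toList (some (trimPass3 a b suf pre n)) none)

-- ===== PRECONDITION & SPEC =====
def Spec_trim_overlap_py (prev : String) (new : String) (max_check : Int) (out : String) : Prop := out = trim_overlap_py_alt prev new max_check
instance (prev : String) (new : String) (max_check : Int) (out : String) : Decidable (Spec_trim_overlap_py prev new max_check out) := by unfold Spec_trim_overlap_py; infer_instance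

-- ===== CLAIM (what is proved, stated in full; the proofs are below) =====
def Claim_equal_trim_overlap_py : Prop := ∀ (prev : String) (new : String) (max_check : Int), Dom_trim_overlap_py prev new max_check → Spec_trim_overlap_py prev new max_check (trim_overlap_py prev new max_check)

-- ===== LEMMAS AND PROOFS =====

-- exact positional encoding of a list of chars, least-significant character first
def pvEnc : List Char → Int
  | [] => 0
  | c :: t => (c.toNat : Int) + 1114112 * pvEnc t

theorem pvEnc_snoc (t : List Char) (c : Char) :
    pvEnc (t ++ [c]) = pvEnc t + (c.toNat : Int) * 1114112 ^ t.length := by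
  induction t with
  | nil => simp [pvEnc]
  | cons d t ih => simp [pvEnc, ih, pow_succ]; ring

-- pass 1 computes, for each j < |r|, the encoding (mod 2^61-1) of the reversed (j+1)-prefix of r
theorem pass1_spec (r : List Char) :
    r.foldl trimPass1Step ((0 : Int), ([] : List Int))
      = (pvEnc r.reverse % 2305843009213693951,
         (List.range r.length).map (fun j => pvEnc ((r.take (j + 1)).reverse) % 2305843009213693951)) := by
  induction r using List.reverseRecOn with
  | nil => simp [pvEnc]
  | append_singleton l c ih =>
    rw [List.foldl_append, ih, List.foldl_cons, List.foldl_nil]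
    have hmodpos : (0 : Int) < 2305843009213693951 := by norm_num
    have hh : PySem.Int.mod ((c.toNat : Int) + 1114112 * (pvEnc l.reverse % 2305843009213693951)) 2305843009213693951
        = pvEnc ((l ++ [c]).reverse) % 2305843009213693951 := by
      rw [PySem.Int.mod_eq_emod_of_pos hmodpos]
      have hme : pvEnc l.reverse % 2305843009213693951
          ≡ pvEnc l.reverse [ZMOD 2305843009213693951] := Int.emod_emod_of_dvd _ dvd_rfl
      have h2 := (hme.mul_left 1114112).add_left ((c.toNat : Int))
      rw [Int.ModEq] at h2
      rw [h2, List.reverse_append, List.reverse_singleton]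
      rfl
    simp only [trimPass1Step, hh, List.length_append, List.length_singleton,
      List.range_succ, List.map_append, List.map_cons, List.map_nil, Prod.mk.injEq]
    refine ⟨trivial, ?_⟩
    congr 1
    · apply List.map_congr_left
      intro j hj
      rw [List.mem_range] at hj
      rw [List.take_append_of_le_length (by omega : j + 1 ≤ l.length)]
    · rw [List.take_of_length_le (by simp : (l ++ [c]).length ≤ l.length + 1)]

-- pass 2 computes, for each j < |s|, the encoding (mod 2^61-1) of the (j+1)-prefix of s
theorem pass2_spec (s : List Char) :
    s.foldl trimPass2Step ((0 : Int), (([] : List Int), (1 : Int)))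
      = (pvEnc s % 2305843009213693951,
         (List.range s.length).map (fun j => pvEnc (s.take (j + 1)) % 2305843009213693951),
         1114112 ^ s.length % 2305843009213693951) := by
  induction s using List.reverseRecOn with
  | nil => simp [pvEnc]
  | append_singleton l c ih =>
    rw [List.foldl_append, ih, List.foldl_cons, List.foldl_nil]
    have hmodpos : (0 : Int) < 2305843009213693951 := by norm_num
    have hh : PySem.Int.mod ((pvEnc l % 2305843009213693951) + (c.toNat : Int) * (1114112 ^ l.length % 2305843009213693951)) 2305843009213693951
        = pvEnc (l ++ [c]) % 2305843009213693951 := by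
      rw [PySem.Int.mod_eq_emod_of_pos hmodpos]
      have h1 : pvEnc l % 2305843009213693951 ≡ pvEnc l [ZMOD 2305843009213693951] :=
        Int.emod_emod_of_dvd _ dvd_rfl
      have h2 : (1114112 : Int) ^ l.length % 2305843009213693951
          ≡ 1114112 ^ l.length [ZMOD 2305843009213693951] := Int.emod_emod_of_dvd _ dvd_rfl
      have h3 := h1.add (h2.mul_left ((c.toNat : Int)))
      rw [Int.ModEq] at h3
      rw [h3, pvEnc_snoc]
    have hpw : PySem.Int.mod ((1114112 ^ l.length % 2305843009213693951) * 1114112) 2305843009213693951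
        = 1114112 ^ (l.length + 1) % 2305843009213693951 := by
      rw [PySem.Int.mod_eq_emod_of_pos hmodpos]
      have h2 : (1114112 : Int) ^ l.length % 2305843009213693951
          ≡ 1114112 ^ l.length [ZMOD 2305843009213693951] := Int.emod_emod_of_dvd _ dvd_rfl
      have h3 := h2.mul_right (1114112 : Int)
      rw [Int.ModEq] at h3
      rw [h3, ← pow_succ]
    simp only [trimPass2Step, hh, hpw, List.length_append, List.length_singleton,
      List.range_succ, List.map_append, List.map_cons, List.map_nil, Prod.mk.injEq]
    refine ⟨trivial, ?_, trivial⟩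
    congr 1
    · apply List.map_congr_left
      intro j hj
      rw [List.mem_range] at hj
      rw [List.take_append_of_le_length (by omega : j + 1 ≤ l.length)]
    · rw [List.take_of_length_le (by simp : (l ++ [c]).length ≤ l.length + 1)]

-- with suf/pre holding the true hashes, pass 3 (longest first, early exit) returns the same
-- value as A's ascending keep-the-last-match fold
theorem pass3_eq (a b : List Char) (n : Nat) (m : Nat) (hm : m ≤ n) :
    trimPass3 a b
        ((List.range n).map (fun j => pvEnc (a.drop (a.length - (j + 1))) % 2305843009213693951))
        ((List.range n).map (fun j => pvEnc (b.take (j + 1)) % 2305843009213693951)) m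
      = (PySem.List.pyRange 1 ((m : Int) + 1) 1).foldl (trimStepA a b) 0 := by
  induction m with
  | zero =>
    rw [show ((0 : Nat) : Int) + 1 = 1 by norm_num,
        PySem.List.pyRange_one_eq_nil (le_refl 1)]
    simp [trimPass3]
  | succ m ih =>
    have hmn : m < n := by omega
    have hlen : ((List.range n).map (fun j => pvEnc (a.drop (a.length - (j + 1))) % 2305843009213693951)).length = n := by
      simp
    have hlen' : ((List.range n).map (fun j => pvEnc (b.take (j + 1)) % 2305843009213693951)).length = n := by
      simp
    have hgs : ((List.range n).map (fun j => pvEnc (a.drop (a.length - (j + 1))) % 2305843009213693951)).getD m 0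
        = pvEnc (a.drop (a.length - (m + 1))) % 2305843009213693951 := by
      rw [List.getD_eq_getElem _ _ (by omega : m < _)]
      simp
    have hgp : ((List.range n).map (fun j => pvEnc (b.take (j + 1)) % 2305843009213693951)).getD m 0
        = pvEnc (b.take (m + 1)) % 2305843009213693951 := by
      rw [List.getD_eq_getElem _ _ (by omega : m < _)]
      simp
    have hstep : ((m + 1 : Nat) : Int) + 1 = ((m : Int) + 1) + 1 := by push_cast; ring
    rw [hstep, PySem.List.pyRange_one_succ_right (by omega : (1 : Int) ≤ (m : Int) + 1),
        List.foldl_append, List.foldl_cons, List.foldl_nil, ← ih (by omega)]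
    have hsla : PySem.List.slice a (some (-((m : Int) + 1))) none = a.drop (a.length - (m + 1)) := by
      rw [show -((m : Int) + 1) = -(((m + 1 : Nat) : Int)) by push_cast; ring]
      exact PySem.List.slice_from_neg_natCast a (m + 1) (by omega)
    have hslb : PySem.List.slice b none (some ((m : Int) + 1)) = b.take (m + 1) := by
      rw [show ((m : Int) + 1) = (((m + 1 : Nat) : Int)) by push_cast; ring]
      exact PySem.List.slice_to_natCast b (m + 1)
    show (if _ ∧ _ then _ else _) = _
    rw [hgs, hgp]
    simp only [trimStepA, hsla, hslb]
    have hcond2 : (pvEnc (a.drop (a.length - (m + 1))) % 2305843009213693951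
          = pvEnc (b.take (m + 1)) % 2305843009213693951
        ∧ a.drop (a.length - (m + 1)) = b.take (m + 1))
        = (a.drop (a.length - (m + 1)) = b.take (m + 1)) := by
      apply propext
      constructor
      · exact And.right
      · intro he
        exact ⟨by rw [he], he⟩
    simp only [hcond2]
    split
    · push_cast; ring
    · rfl

-- ===== VERDICT (by name: the statement is the Claim_ definition above) =====
theorem trim_overlap_py_spec : Claim_equal_trim_overlap_py := by
  intro prev new max_check _
  unfold Spec_trim_overlap_py trim_overlap_py trim_overlap_py_alt
  by_cases h : prev.toList = [] ∨ new.toList = []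
  · rw [if_pos h, if_pos h]
  · rw [if_neg h, if_neg h]
    simp only []
    set a := PySem.List.slice prev.toList (some (-max_check)) none with ha
    set b := PySem.List.slice new.toList none (some max_check) with hb
    set n := min a.length b.length with hn
    have hna : n ≤ a.length := Nat.min_le_left _ _
    have hnb : n ≤ b.length := Nat.min_le_right _ _
    have hstart : PySem.List.slice a (some ((a.length : Int) - (n : Int))) none
        = a.drop (a.length - n) := by
      rw [PySem.List.slice_from a (by omega : (0 : Int) ≤ (a.length : Int) - (n : Int))]
      congr 1
      omega
    have hsuf : (((PySem.List.slice a (some ((a.length : Int) - (n : Int))) none).reverse).foldl trimPass1Step ((0 : Int), ([] : List Int))).2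
        = (List.range n).map (fun j => pvEnc (a.drop (a.length - (j + 1))) % 2305843009213693951) := by
      rw [hstart, pass1_spec]
      have hrl : (a.drop (a.length - n)).length = n := by simp; omega
      rw [show ((a.drop (a.length - n)).reverse.length) = n by simp [hrl]]
      apply List.map_congr_left
      intro j hj
      rw [List.mem_range] at hj
      rw [List.take_reverse, List.reverse_reverse, List.drop_drop, hrl,
          show a.length - n + (n - (j + 1)) = a.length - (j + 1) from by omega]
    have hpre : ((PySem.List.slice b none (some (n : Int))).foldl trimPass2Step ((0 : Int), (([] : List Int), (1 : Int)))).2.1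
        = (List.range n).map (fun j => pvEnc (b.take (j + 1)) % 2305843009213693951) := by
      rw [PySem.List.slice_to_natCast, pass2_spec]
      rw [show (b.take n).length = n by simp; omega]
      apply List.map_congr_left
      intro j hj
      rw [List.mem_range] at hj
      rw [List.take_take, show min (j + 1) n = j + 1 from by omega]
    rw [hsuf, hpre, pass3_eq a b n n (le_refl n)]
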